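-- pv_equiv track=rewrite | github.com/eunsu-park/ap-project | 03_Regression/src/pipeline.py | split_by_class
-- ===== SOURCE A (Python) =====
-- from typing import Dict, List, Tuple, Optional, Union
--
-- def split_by_class(
--     file_list: List[Tuple[str, int]]
-- ) -> Tuple[List[Tuple[str, int]], List[Tuple[str, int]]]:
--     """Split file list into positive and negative samples.
--
--     Args:
--         file_list: List of (filename, label) tuples
--
--     Returns:
--         Tuple of (positive_list, negative_list)
--     """
--     positive = []
--     negative = []
--     for file_name, label in file_list:
--         if label == 0:
--             negative.append((file_name, label))
--         else:
--             positive.append((file_name, label))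
--     positive.sort(key=lambda x: x[0])
--     negative.sort(key=lambda x: x[0])
--     return positive, negative
-- ===== SOURCE B (Python) =====
-- def split_by_class(file_list):
--     """Split file list into positive and negative samples.
--
--     Pre-sorts the whole input once by filename (stable), then partitions
--     the sorted list with two comprehensions instead of sorting each half.
--     """
--     ordered = sorted(file_list, key=lambda x: x[0])
--     positive = [item for item in ordered if item[1] != 0]
--     negative = [item for item in ordered if item[1] == 0]
--     return positive, negative
-- ===== Notes on version B (the rewrite author's own statement) =====
-- stated objective: alternative
-- what changed: B sorts the whole input once by filename and then partitions the sorted list with two comprehensions, instead of A's append-loop into two lists followed by two separate sorts.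
import Mathlib
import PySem

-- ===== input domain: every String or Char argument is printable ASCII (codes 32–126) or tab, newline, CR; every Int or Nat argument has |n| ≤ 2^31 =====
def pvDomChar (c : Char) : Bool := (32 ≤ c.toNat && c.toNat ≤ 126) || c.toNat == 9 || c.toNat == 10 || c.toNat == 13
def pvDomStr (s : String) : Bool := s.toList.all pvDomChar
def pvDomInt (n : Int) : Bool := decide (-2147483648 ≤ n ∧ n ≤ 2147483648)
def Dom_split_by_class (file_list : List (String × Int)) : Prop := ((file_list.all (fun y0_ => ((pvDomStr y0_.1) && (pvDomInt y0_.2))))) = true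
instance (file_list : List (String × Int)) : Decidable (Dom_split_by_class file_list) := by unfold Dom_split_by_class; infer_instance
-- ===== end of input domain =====

-- B pre-sorts the whole input once by filename and partitions the sorted list with two
-- filters, instead of A's append-loop into two lists followed by two separate sorts
-- (alternative decomposition, same asymptotic cost).


-- ===== PORT A =====
-- loop appending to (positive, negative), then each list sorted by filename
def split_by_class (file_list : List (String × Int)) : (List (String × Int)) × (List (String × Int)) :=
  let pn := file_list.foldl
    (fun (acc : List (String × Int) × List (String × Int)) fl =>
      if fl.2 == 0 then (acc.1, acc.2 ++ [fl]) else (acc.1 ++ [fl], acc.2))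
    ([], [])
  (PySem.List.sorted pn.1 (fun x => x.1) false, PySem.List.sorted pn.2 (fun x => x.1) false)

-- ===== PORT B =====
-- one stable sort of the whole list by filename, then two filter passes
def split_by_class_alt (file_list : List (String × Int)) : (List (String × Int)) × (List (String × Int)) :=
  let ordered := PySem.List.sorted file_list (fun x => x.1) false
  (ordered.filter (fun x => x.2 != 0), ordered.filter (fun x => x.2 == 0))

-- ===== PRECONDITION & SPEC =====
def Spec_split_by_class (file_list : List (String × Int)) (out : (List (String × Int)) × (List (String × Int))) : Prop := out = split_by_class_alt file_list
instance (file_list : List (String × Int)) (out : (List (String × Int)) × (List (String × Int))) : Decidable (Spec_split_by_class file_list out) := by unfold Spec_split_by_class; infer_instance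

-- ===== CLAIM (what is proved, stated in full; the proofs are below) =====
def Claim_equal_split_by_class : Prop := ∀ (file_list : List (String × Int)), Dom_split_by_class file_list → Spec_split_by_class file_list (split_by_class file_list)

-- ===== LEMMAS AND PROOFS =====

-- inserting an element that is strictly below everything puts it in front
theorem insertBy_all_lt {α κ : Type} [LinearOrder κ] (key : α → κ) (x : α) (ys : List α)
    (h : ∀ z ∈ ys, key x < key z) :
    PySem.List.insertBy (fun a b => decide (key a < key b)) x ys = x :: ys := by
  cases ys with
  | nil => simp [PySem.List.insertBy]
  | cons y ys => simp [PySem.List.insertBy, h y (by simp)]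

-- filter commutes with one insertion into a key-sorted list
theorem filter_insertBy {α κ : Type} [LinearOrder κ] (p : α → Bool) (key : α → κ) (x : α)
    (ys : List α) (h : ys.Pairwise (fun a b => key a ≤ key b)) :
    (PySem.List.insertBy (fun a b => decide (key a < key b)) x ys).filter p
      = if p x then PySem.List.insertBy (fun a b => decide (key a < key b)) x (ys.filter p)
        else ys.filter p := by
  induction ys with
  | nil =>
    simp only [PySem.List.insertBy, List.filter_nil]
    by_cases hpx : p x <;> simp [hpx]
  | cons y ys ih =>
    rw [List.pairwise_cons] at h
    by_cases hxy : key x < key y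
    · -- x goes in front; everything in y :: ys is ≥ key y > key x
      have hall : ∀ z ∈ (y :: ys).filter p, key x < key z := by
        intro z hz
        rcases List.mem_cons.mp (List.mem_of_mem_filter hz) with rfl | hz'
        · exact hxy
        · exact lt_of_lt_of_le hxy (h.1 z hz')
      simp only [PySem.List.insertBy, hxy, decide_true, if_true]
      by_cases hpx : p x
      · rw [insertBy_all_lt key x _ hall]
        simp [List.filter_cons, hpx]
      · simp [List.filter_cons, hpx]
    · simp only [PySem.List.insertBy, hxy, decide_false, Bool.false_eq_true, if_false]
      by_cases hpy : p y
      · simp only [List.filter_cons, hpy, if_true, ih h.2]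
        by_cases hpx : p x
        · simp [hpx, PySem.List.insertBy, hxy]
        · simp [hpx]
      · simp [List.filter_cons, hpy, ih h.2]

-- filter commutes with Python's stable sort keyed on a component the filter ignores… (any filter, in fact)
theorem filter_sorted {α κ : Type} [LinearOrder κ] (p : α → Bool) (key : α → κ)
    (xs : List α) :
    (PySem.List.sorted xs key false).filter p = PySem.List.sorted (xs.filter p) key false := by
  induction xs using List.reverseRecOn with
  | nil => simp [PySem.List.sorted]
  | append_singleton xs x ih =>
    rw [PySem.List.sorted_eq_foldl_insertBy, List.foldl_append, List.foldl_cons, List.foldl_nil,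
      ← PySem.List.sorted_eq_foldl_insertBy,
      filter_insertBy p key x _ (PySem.List.sorted_pairwise xs key), ih,
      List.filter_append]
    by_cases hpx : p x
    · simp only [hpx, if_true, List.filter_cons, List.filter_nil,
        PySem.List.sorted_eq_foldl_insertBy, List.foldl_append, List.foldl_cons, List.foldl_nil]
    · simp [hpx]

-- A's appending loop is the pair of filters
theorem foldl_pair_filter (xs : List (String × Int)) (a b : List (String × Int)) :
    xs.foldl
      (fun (acc : List (String × Int) × List (String × Int)) fl =>
        if fl.2 == 0 then (acc.1, acc.2 ++ [fl]) else (acc.1 ++ [fl], acc.2)) (a, b)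
      = (a ++ xs.filter (fun x => x.2 != 0), b ++ xs.filter (fun x => x.2 == 0)) := by
  induction xs generalizing a b with
  | nil => simp
  | cons x xs ih =>
    rw [List.foldl_cons]
    by_cases hx : x.2 == 0
    · have h1 : (x.2 != 0) = false := by simpa using hx
      rw [if_pos hx, ih]
      simp [List.filter_cons, h1, hx]
    · have h1 : (x.2 != 0) = true := by simpa using hx
      rw [if_neg hx, ih]
      simp [List.filter_cons, h1, hx]

-- ===== VERDICT (by name: the statement is the Claim_ definition above) =====
theorem split_by_class_spec : Claim_equal_split_by_class := by
  intro file_list _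
  unfold Spec_split_by_class split_by_class split_by_class_alt
  simp only [foldl_pair_filter, List.nil_append]
  rw [← filter_sorted, ← filter_sorted]
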